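-- pv_equiv track=rewrite | github.com/YuchenLi01/transformers_are_uninterpretable | src/utils.py | get_vocab_of_bracket_types
-- ===== SOURCE A (Python) =====
-- import string
--
-- def get_identifier_iterator():
--     """ Returns an iterator to provide unique ids to bracket types.
--     """
--     ids = iter(list(string.ascii_lowercase))
--     k = 1
--     while True:
--         try:
--             str_id = next(ids)
--         except StopIteration:
--             ids = iter(list(string.ascii_lowercase))
--             k += 1
--             str_id = next(ids)
--         yield str_id*k
--
-- def get_vocab_of_bracket_types(bracket_types):
--     """ Returns the vocabulary corresponding to the number of brackets.
--
--     There are bracket_types open brackets, bracket_types close brackets,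
--     START, and END.
--     Arguments:
--       bracket_types: int (k in Dyck-(k,m))
--     Returns:
--       Dictionary mapping symbol string  s to int ids.
--     """
--     id_iterator = get_identifier_iterator()
--     ids = [next(id_iterator) for x in range(bracket_types)]
--     vocab = {x: c for c, x in enumerate(
--                 ['PAD', 'MASK', 'START', 'END']
--                 + ['(' + id_str for id_str in ids]
--                 + [id_str + ')' for id_str in ids]
--             )}
--     closing_bracket_ids = {vocab[id_str + ')'] for id_str in ids}
--     return vocab, ids, closing_bracket_ids
-- ===== SOURCE B (Python) =====
-- import string
--
-- def get_vocab_of_bracket_types(bracket_types):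
--     """Closed-form rewrite: derive each identifier directly from its index
--     (letter i % 26 repeated i // 26 + 1 times) instead of running a stateful
--     generator, and compute the closing-bracket ids arithmetically as a
--     contiguous range instead of looking each closing symbol up in the dict."""
--     ids = [string.ascii_lowercase[i % 26] * (i // 26 + 1)
--            for i in range(bracket_types)]
--     symbols = ['PAD', 'MASK', 'START', 'END'] \
--         + ['(' + s for s in ids] + [s + ')' for s in ids]
--     vocab = dict(zip(symbols, range(len(symbols))))
--     closing_bracket_ids = set(range(4 + bracket_types, 4 + 2 * bracket_types))
--     return vocab, ids, closing_bracket_ids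
-- ===== Notes on version B (the rewrite author's own statement) =====
-- stated objective: simpler
-- what changed: Each bracket identifier is derived in closed form from its index (letter i % 26 repeated i // 26 + 1 times) instead of being pulled from a stateful infinite generator, and the closing-bracket id set is computed arithmetically as range(4 + n, 4 + 2n) instead of looking every closing symbol up in the vocabulary dict.
import Mathlib
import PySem

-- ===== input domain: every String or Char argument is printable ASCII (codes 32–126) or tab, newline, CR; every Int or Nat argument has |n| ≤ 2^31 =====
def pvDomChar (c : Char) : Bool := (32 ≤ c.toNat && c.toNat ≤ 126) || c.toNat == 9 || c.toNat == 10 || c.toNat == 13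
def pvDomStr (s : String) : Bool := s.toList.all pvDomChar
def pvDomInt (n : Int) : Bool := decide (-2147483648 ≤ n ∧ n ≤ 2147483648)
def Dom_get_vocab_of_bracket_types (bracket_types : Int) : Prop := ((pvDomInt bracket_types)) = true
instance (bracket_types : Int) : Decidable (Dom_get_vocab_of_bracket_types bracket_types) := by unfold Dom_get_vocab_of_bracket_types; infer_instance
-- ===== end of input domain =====

-- B replaces A's stateful identifier generator by a closed-form derivation of each
-- identifier and computes the closing-bracket ids arithmetically as a contiguous range
-- instead of looking each closing symbol up in the vocabulary (objective: simpler).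

-- Python's `str * int` (both Pythons repeat a string with `*`)
def pyStrMul (s : String) (k : Int) : String :=
  String.ofList ((List.replicate k.toNat s.toList).flatten)

-- ===== PORT A =====

-- list(string.ascii_lowercase)
def asciiLowerList : List String :=
  ["a","b","c","d","e","f","g","h","i","j","k","l","m","n","o","p","q","r","s","t",
   "u","v","w","x","y","z"]

-- one `next(id_iterator)` step of A's generator: state = (remaining letters, k);
-- try: pop; except StopIteration: reset the letters, k += 1, pop; yield str_id * k
def genNext : List String × Int → String × (List String × Int)
  | ([], k) =>
      match asciiLowerList with
      | [] => ("", ([], k + 1))            -- unreachable: the alphabet literal is nonempty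
      | s :: rest => (pyStrMul s (k + 1), (rest, k + 1))
  | (s :: rest, k) => (pyStrMul s k, (rest, k))

def get_vocab_of_bracket_types (bracket_types : Int) : (List (String × Int)) × List String × List Int :=
  -- ids = [next(id_iterator) for x in range(bracket_types)]
  let folded := (PySem.List.pyRange 0 bracket_types 1).foldl
    (fun (p : List String × (List String × Int)) (_ : Int) =>
      (p.1 ++ [(genNext p.2).1], (genNext p.2).2))
    ([], (asciiLowerList, 1))
  let ids := folded.1
  -- vocab = {x: c for c, x in enumerate(['PAD','MASK','START','END'] + … + …)}
  let symbols :=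
    ["PAD", "MASK", "START", "END"]
      ++ ids.map (fun id_str => "(" ++ id_str)
      ++ ids.map (fun id_str => id_str ++ ")")
  let vocab := (PySem.List.enumerate symbols).foldl
    (fun d (p : Int × String) => d.insert p.2 p.1) PySem.Dict.empty
  -- closing_bracket_ids = {vocab[id_str + ')'] for id_str in ids}
  -- (the key id_str + ')' is always a key of vocab — proved below — so `getD … 0`
  --  computes exactly Python's vocab[id_str + ')'])
  let closing := ids.foldl
    (fun (s : PySem.Set Int) id_str => s.add (vocab.getD (id_str ++ ")") 0))
    PySem.Set.empty
  (vocab.items, ids, closing)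

-- ===== PORT B =====

-- string.ascii_lowercase
def asciiLowerStr : String := "abcdefghijklmnopqrstuvwxyz"

def get_vocab_of_bracket_types_alt (bracket_types : Int) : (List (String × Int)) × List String × List Int :=
  -- ids = [string.ascii_lowercase[i % 26] * (i // 26 + 1) for i in range(bracket_types)]
  -- (0 ≤ i % 26 < 26 is always in range, so the `.getD ""` branch of s[…] is never taken)
  let ids := (PySem.List.pyRange 0 bracket_types 1).map (fun i =>
    pyStrMul
      (((PySem.Str.pyGet? asciiLowerStr (PySem.Int.mod i 26)).map
          (fun c => String.ofList [c])).getD "")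
      (PySem.Int.floordiv i 26 + 1))
  let symbols :=
    ["PAD", "MASK", "START", "END"]
      ++ ids.map (fun s => "(" ++ s) ++ ids.map (fun s => s ++ ")")
  -- vocab = dict(zip(symbols, range(len(symbols))))
  let vocab := PySem.Dict.ofList
    (symbols.zip (PySem.List.pyRange 0 (symbols.length : Int) 1))
  -- closing_bracket_ids = set(range(4 + bracket_types, 4 + 2 * bracket_types))
  let closing := PySem.Set.ofList
    (PySem.List.pyRange (4 + bracket_types) (4 + 2 * bracket_types) 1)
  (vocab.items, ids, closing)

-- ===== PRECONDITION & SPEC =====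
def Spec_get_vocab_of_bracket_types (bracket_types : Int) (out : (List (String × Int)) × List String × List Int) : Prop := out = get_vocab_of_bracket_types_alt bracket_types
instance (bracket_types : Int) (out : (List (String × Int)) × List String × List Int) : Decidable (Spec_get_vocab_of_bracket_types bracket_types out) := by unfold Spec_get_vocab_of_bracket_types; infer_instance

-- ===== CLAIM (what is proved, stated in full; the proofs are below) =====
def Claim_equal_get_vocab_of_bracket_types : Prop := ∀ (bracket_types : Int), Dom_get_vocab_of_bracket_types bracket_types → Spec_get_vocab_of_bracket_types bracket_types (get_vocab_of_bracket_types bracket_types)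

-- ===== LEMMAS AND PROOFS =====

def idC (j : Nat) : String :=
  pyStrMul (asciiLowerList.getD (j % 26) "") ((j / 26 : Nat) + 1)
def stA (j : Nat) : List String × Int :=
  if j = 0 then (asciiLowerList, 1)
  else (asciiLowerList.drop ((j - 1) % 26 + 1), ((j - 1) / 26 : Nat) + 1)

lemma genNext_stA (m : Nat) : genNext (stA m) = (idC m, stA (m + 1)) := by
  rcases Nat.eq_zero_or_pos m with h0 | hpos
  · subst h0; decide
  · have hm : ¬ m = 0 := by omega
    by_cases hc : (m - 1) % 26 = 25
    · have h1 : (m - 1) % 26 + 1 = 26 := by omega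
      have h2 : m % 26 = 0 := by omega
      have h3 : (m + 1 - 1) % 26 + 1 = 1 := by omega
      have h4 : m / 26 = (m - 1) / 26 + 1 := by omega
      have h5 : (m + 1 - 1) / 26 = m / 26 := by omega
      simp only [stA, if_neg hm, if_neg (by omega : ¬ m + 1 = 0), h1, h3, h5, h4, idC, h2]
      norm_num [genNext, asciiLowerList]
    · have hlt : (m - 1) % 26 + 1 < 26 := by omega
      have hr : m % 26 = (m - 1) % 26 + 1 := by omega
      have hq : m / 26 = (m - 1) / 26 := by omega
      have h3 : (m + 1 - 1) % 26 + 1 = (m - 1) % 26 + 1 + 1 := by omega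
      have h5 : (m + 1 - 1) / 26 = (m - 1) / 26 := by omega
      have hdrop : asciiLowerList.drop ((m - 1) % 26 + 1)
          = asciiLowerList[(m - 1) % 26 + 1] :: asciiLowerList.drop ((m - 1) % 26 + 1 + 1) :=
        List.drop_eq_getElem_cons (by simpa [asciiLowerList] using hlt)
      simp only [stA, if_neg hm, if_neg (by omega : ¬ m + 1 = 0), h3, h5, hq, idC, hr, hdrop, genNext]
      congr 1
      rw [List.getD_eq_getElem _ _ (by simpa [asciiLowerList] using hlt)]
      rfl

lemma foldA_eq {α : Type} (l : List α) :
    l.foldl (fun (p : List String × (List String × Int)) (_ : α) =>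
        (p.1 ++ [(genNext p.2).1], (genNext p.2).2)) ([], (asciiLowerList, 1))
      = ((List.range l.length).map idC, stA l.length) := by
  induction l using List.reverseRecOn with
  | nil => simp [stA]
  | append_singleton xs x ih =>
      simp only [List.foldl_append, List.foldl_cons, List.foldl_nil, ih,
        List.length_append, List.length_singleton, List.range_succ, List.map_append,
        List.map_cons, List.map_nil, genNext_stA]

def charC (r : Nat) : Char := "abcdefghijklmnopqrstuvwxyz".toList.getD r 'a'

lemma asciiLowerList_getD (r : Nat) (h : r < 26) :
    asciiLowerList.getD r "" = String.ofList [charC r] := by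
  interval_cases r <;> rfl

lemma toList_pyStrMul_single (c : Char) (t : Nat) :
    (pyStrMul (String.ofList [c]) ((t : Int))).toList = List.replicate t c := by
  simp [pyStrMul]

lemma toList_idC (j : Nat) : (idC j).toList = List.replicate (j / 26 + 1) (charC (j % 26)) := by
  rw [idC, asciiLowerList_getD _ (Nat.mod_lt _ (by norm_num)),
    (by push_cast; ring : ((j / 26 : Nat) : Int) + 1 = ((j / 26 + 1 : Nat) : Int)),
    toList_pyStrMul_single]

lemma charC_inj (r s : Nat) (hr : r < 26) (hs : s < 26) (h : charC r = charC s) : r = s := by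
  revert h; interval_cases r <;> interval_cases s <;> decide

lemma idC_inj {i j : Nat} (h : idC i = idC j) : i = j := by
  have h' := congrArg String.toList h
  rw [toList_idC, toList_idC] at h'
  have hlen : i / 26 + 1 = j / 26 + 1 := by
    have := congrArg List.length h'; simpa using this
  have hhead : charC (i % 26) = charC (j % 26) := by
    have := congrArg (fun l => List.headD l ' ') h'; simpa using this
  have := charC_inj _ _ (Nat.mod_lt _ (by norm_num)) (Nat.mod_lt _ (by norm_num)) hhead
  omega

lemma pyGet_lower (r : Nat) (h : r < 26) :
    ((PySem.Str.pyGet? asciiLowerStr ((r : Nat) : Int)).map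
        (fun c => String.ofList [c])).getD "" = asciiLowerList.getD r "" := by
  interval_cases r <;> rfl

lemma idB_eq (j : Nat) :
    pyStrMul
      (((PySem.Str.pyGet? asciiLowerStr (PySem.Int.mod ((j : Nat) : Int) 26)).map
          (fun c => String.ofList [c])).getD "")
      (PySem.Int.floordiv ((j : Nat) : Int) 26 + 1) = idC j := by
  have h1 : PySem.Int.mod ((j : Nat) : Int) 26 = ((j % 26 : Nat) : Int) := by
    exact_mod_cast PySem.Int.mod_natCast j 26
  have h2 : PySem.Int.floordiv ((j : Nat) : Int) 26 = ((j / 26 : Nat) : Int) := by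
    exact_mod_cast PySem.Int.floordiv_natCast j 26
  rw [h1, h2, pyGet_lower _ (Nat.mod_lt _ (by norm_num)), idC]

lemma head_open (s : String) : ("(" ++ s).toList.headD ' ' = '(' := by
  simp

lemma head_close (j : Nat) :
    ((idC j ++ ")").toList.headD ' ') = charC (j % 26) := by
  have : (idC j ++ ")").toList = (idC j).toList ++ [')'] := by simp
  rw [this, toList_idC]
  simp [List.replicate_succ]

lemma charC_lower (j : Nat) : 'a' ≤ charC (j % 26) ∧ charC (j % 26) ≤ 'z' := by
  have h : j % 26 < 26 := Nat.mod_lt _ (by norm_num)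
  set r := j % 26
  clear_value r
  interval_cases r <;> exact ⟨by decide, by decide⟩

def symbolsOf (ids : List String) : List String :=
  ["PAD", "MASK", "START", "END"]
    ++ ids.map (fun s => "(" ++ s) ++ ids.map (fun s => s ++ ")")

lemma nodup_symbols (m : Nat) : (symbolsOf ((List.range m).map idC)).Nodup := by
  rw [symbolsOf, List.nodup_append, List.nodup_append]
  refine ⟨⟨by decide, ?_, ?_⟩, ?_, ?_⟩
  · -- opens nodup
    rw [List.map_map]
    refine (List.nodup_range).map_on ?_
    intro i _ j _ h
    apply idC_inj
    simp only [Function.comp_apply] at h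
    have := congrArg String.toList h
    simp at this
    exact String.toList_inj.mp this
  · -- base disjoint opens
    intro s hs s' hs'
    obtain ⟨t, _, rfl⟩ := List.mem_map.1 hs'
    have := head_open t
    fin_cases hs <;> intro hcon <;>
      (have h2 := congrArg (fun s => s.toList.headD ' ') hcon;
       simp only [head_open] at h2;
       exact absurd h2 (by decide))
  · -- closes nodup
    rw [List.map_map]
    refine (List.nodup_range).map_on ?_
    intro i _ j _ h
    apply idC_inj
    simp only [Function.comp_apply] at h
    have := congrArg String.toList h
    simp at this
    exact String.toList_inj.mp this
  · -- base ++ opens disjoint closes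
    intro s hs s' hs'
    obtain ⟨t, ht, rfl⟩ := List.mem_map.1 hs'
    obtain ⟨j, _, rfl⟩ := List.mem_map.1 ht
    have hc := head_close j
    have hl := charC_lower j
    intro hcon
    rw [← hcon] at hc
    rw [← hc] at hl
    rcases List.mem_append.1 hs with hb | ho
    · fin_cases hb <;> revert hl <;> decide
    · obtain ⟨t, _, rfl⟩ := List.mem_map.1 ho
      rw [head_open] at hl
      revert hl; decide

lemma swap_enumerate (xs : List String) : ∀ (s : Int),
    (PySem.List.enumerate xs s).map (fun (p : Int × String) => (p.2, p.1))
      = xs.zip (PySem.List.pyRange s (s + (xs.length : Int)) 1) := by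
  induction xs with
  | nil => intro s; simp [PySem.List.enumerate]
  | cons x xs ih =>
      intro s
      rw [show ((x :: xs).length : Int) = (xs.length : Int) + 1 by simp,
        show s + ((xs.length : Int) + 1) = (s + 1) + (xs.length : Int) by ring,
        PySem.List.enumerate_cons, PySem.List.pyRange_one_cons (by omega)]
      simp only [List.map_cons, List.zip_cons_cons, ih (s + 1)]

lemma vocabA_items (symbols : List String) (hnd : symbols.Nodup) :
    ((PySem.List.enumerate symbols).foldl
        (fun d (p : Int × String) => d.insert p.2 p.1) PySem.Dict.empty).items
      = symbols.zip (PySem.List.pyRange 0 (symbols.length : Int) 1) := by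
  have h := PySem.Dict.items_foldl_insert_fresh (PySem.List.enumerate symbols)
    (fun (p : Int × String) => p.2) (fun p => p.1) PySem.Dict.empty
    (by intro a _; simp [PySem.Dict.empty, PySem.Dict.contains_mk])
    (by rw [PySem.List.map_snd_enumerate]; exact hnd)
  rw [h]
  have := swap_enumerate symbols 0
  rw [zero_add] at this
  simpa using this

lemma vocabB_items (symbols : List String) (hnd : symbols.Nodup) :
    (PySem.Dict.ofList (symbols.zip (PySem.List.pyRange 0 (symbols.length : Int) 1))).items
      = symbols.zip (PySem.List.pyRange 0 (symbols.length : Int) 1) := by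
  rw [PySem.Dict.ofList, PySem.Dict.update]
  have hlen : symbols.length ≤ (PySem.List.pyRange 0 (symbols.length : Int) 1).length := by
    rw [PySem.List.length_pyRange_one]; simp
  have h := PySem.Dict.items_foldl_insert_fresh
    (symbols.zip (PySem.List.pyRange 0 (symbols.length : Int) 1))
    (fun (p : String × Int) => p.1) (fun p => p.2) PySem.Dict.empty
    (by intro a _; simp [PySem.Dict.empty, PySem.Dict.contains_mk])
    (by rw [show (fun (p : String × Int) => p.1) = Prod.fst from rfl,
            List.map_fst_zip hlen]; exact hnd)
  rw [h]
  simp [PySem.Dict.empty]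

lemma vocab_getD (m j : Nat) (hj : j < m)
    (d : PySem.Dict String Int)
    (hd : d.items = (symbolsOf ((List.range m).map idC)).zip
        (PySem.List.pyRange 0 (((symbolsOf ((List.range m).map idC)).length : Int)) 1)) :
    d.getD (idC j ++ ")") 0 = 4 + (m : Int) + (j : Int) := by
  have hslen : (symbolsOf ((List.range m).map idC)).length = 4 + m + m := by
    simp [symbolsOf]; omega
  have hrlen : (PySem.List.pyRange 0 (((symbolsOf ((List.range m).map idC)).length : Int)) 1).length
      = 4 + m + m := by
    rw [PySem.List.length_pyRange_one]; simp [hslen]; omega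
  have hkeys : d.keys.Nodup := by
    rw [PySem.Dict.keys, hd, show (fun (p : String × Int) => p.1) = Prod.fst from rfl,
      List.map_fst_zip (by rw [hrlen, hslen])]
    exact nodup_symbols m
  have hb : 4 + m + j < ((symbolsOf ((List.range m).map idC)).zip
      (PySem.List.pyRange 0 (((symbolsOf ((List.range m).map idC)).length : Int)) 1)).length := by
    rw [List.length_zip, hrlen, hslen]; omega
  have h1 : ((symbolsOf ((List.range m).map idC)).zip
      (PySem.List.pyRange 0 (((symbolsOf ((List.range m).map idC)).length : Int)) 1))[4 + m + j]'hb
      = ((idC j ++ ")"), 4 + (m : Int) + (j : Int)) := by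
    rw [List.getElem_zip]
    refine Prod.ext ?_ ?_
    · show (symbolsOf ((List.range m).map idC))[4 + m + j]'(by rw [hslen]; omega) = _
      simp only [symbolsOf]
      rw [List.getElem_append_right (by simp; omega)]
      simp only [List.length_append, List.length_map, List.length_range]
      rw [List.getElem_map]
      congr 1
      rw [List.getElem_map, List.getElem_range]
      congr 1
      simp
    · show (PySem.List.pyRange 0 (((symbolsOf ((List.range m).map idC)).length : Int)) 1)[4 + m + j]'(by rw [hrlen]; omega) = _
      rw [PySem.List.getElem_pyRange_one]
      push_cast
      ring
  have hmem : ((idC j ++ ")"), 4 + (m : Int) + (j : Int)) ∈ d.items := by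
    rw [hd, ← h1]; exact List.getElem_mem _
  exact PySem.Dict.getD_of_mem_items d hmem hkeys 0

lemma closingA_eq (m : Nat) (d : PySem.Dict String Int)
    (hdg : ∀ j, j < m → d.getD (idC j ++ ")") 0 = 4 + (m : Int) + (j : Int)) :
    ((List.range m).map idC).foldl
        (fun (s : PySem.Set Int) id_str => s.add (d.getD (id_str ++ ")") 0))
        PySem.Set.empty
      = (List.range m).map (fun (j : Nat) => 4 + (m : Int) + (j : Int)) := by
  rw [List.foldl_map]
  rw [← List.foldl_map (f := fun (j : Nat) => d.getD (idC j ++ ")") 0) (g := fun (s : PySem.Set Int) v => PySem.Set.add s v)]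
  rw [← PySem.Set.update_eq_foldl]
  rw [List.map_congr_left (fun j hj => hdg j (List.mem_range.1 hj))]
  rw [PySem.Set.update_eq_append_of_disjoint]
  · simp [PySem.Set.empty]
  · refine (List.nodup_range).map_on ?_
    intro i _ j _ h
    omega
  · intro x _
    simp [PySem.Set.empty]

lemma closingB_eq (n : Int) :
    PySem.Set.ofList (PySem.List.pyRange (4 + n) (4 + 2 * n) 1)
      = (List.range n.toNat).map (fun (j : Nat) => 4 + ((n.toNat : Nat) : Int) + (j : Int)) := by
  rw [PySem.Set.ofList_eq_self_of_nodup _ (PySem.List.nodup_pyRange_one _ _)]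
  by_cases hn : 0 ≤ n
  · rw [PySem.List.pyRange_one]
    rw [show (4 + 2 * n - (4 + n)) = n by ring]
    refine List.map_congr_left ?_
    intro k _
    rw [Int.toNat_of_nonneg hn]
  · rw [PySem.List.pyRange_one_eq_nil (by omega)]
    rw [show n.toNat = 0 by omega]
    simp

-- ===== VERDICT (by name: the statement is the Claim_ definition above) =====
theorem get_vocab_of_bracket_types_spec : Claim_equal_get_vocab_of_bracket_types := by
  intro n _
  unfold Spec_get_vocab_of_bracket_types
  simp only [get_vocab_of_bracket_types, get_vocab_of_bracket_types_alt]
  have hlen : (PySem.List.pyRange 0 n 1).length = n.toNat := by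
    rw [PySem.List.length_pyRange_one]; simp
  have hA : (PySem.List.pyRange 0 n 1).foldl
      (fun (p : List String × (List String × Int)) (_ : Int) =>
        (p.1 ++ [(genNext p.2).1], (genNext p.2).2)) ([], (asciiLowerList, 1))
      = ((List.range n.toNat).map idC, stA n.toNat) := by
    rw [foldA_eq, hlen]
  have hB : (PySem.List.pyRange 0 n 1).map (fun i =>
      pyStrMul
        (((PySem.Str.pyGet? asciiLowerStr (PySem.Int.mod i 26)).map
            (fun c => String.ofList [c])).getD "")
        (PySem.Int.floordiv i 26 + 1))
      = (List.range n.toNat).map idC := by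
    rw [PySem.List.pyRange_one, List.map_map]
    rw [show (n - 0) = n by ring]
    refine List.map_congr_left ?_
    intro k _
    have h := idB_eq k
    simp only [Function.comp_apply, zero_add]
    exact h
  rw [hA, hB]
  set m : Nat := n.toNat with hm
  have hv1 := vocabA_items (symbolsOf ((List.range m).map idC)) (nodup_symbols m)
  have hv2 := vocabB_items (symbolsOf ((List.range m).map idC)) (nodup_symbols m)
  simp only [symbolsOf] at hv1 hv2
  rw [hv1, hv2]
  refine Prod.ext rfl (Prod.ext rfl ?_)
  show ((List.range m).map idC).foldl _ PySem.Set.empty = _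
  have hd : ((PySem.List.enumerate (["PAD", "MASK", "START", "END"]
        ++ ((List.range m).map idC).map (fun id_str => "(" ++ id_str)
        ++ ((List.range m).map idC).map (fun id_str => id_str ++ ")"))).foldl
      (fun d (p : Int × String) => d.insert p.2 p.1) PySem.Dict.empty).items
      = (symbolsOf ((List.range m).map idC)).zip
          (PySem.List.pyRange 0 (((symbolsOf ((List.range m).map idC)).length : Int)) 1) := by
    rw [vocabA_items _ (by
      have := nodup_symbols m; simpa [symbolsOf] using this)]
    simp [symbolsOf]
  rw [closingA_eq m _ (fun j hj => vocab_getD m j hj _ hd), closingB_eq n, ← hm]
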